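-- pv_equiv track=rewrite | github.com/lucanchling/ASO | ASO_IOS/utils/pre_icp.py | organizeLandmark
-- ===== SOURCE A (Python) =====
-- def organizeLandmark(landmarks : list):
--     assert isinstance(landmarks,list)
--     assert len(landmarks) == 3
--
--     out = {'left':'','middle':'','right':''}
--
--     toothTonumber = {'UR8': '1', 'UR7': '2', 'UR6': '3', 'UR5': '4', 'UR4': '5', 'UR3': '6', 'UR2': '7', 'UR1': '8', 'UL1': '9', 'UL2': '10', 'UL3': '11', 'UL4': '12', 'UL5': '13',
--     'UL6': '14', 'UL7': '15', 'UL8': '16', 'LL8': '17', 'LL7': '18', 'LL6': '19', 'LL5': '20', 'LL4': '21', 'LL3': '22', 'LL2': '23', 'LL1': '24', 'LR1': '25', 'LR2': '26', 'LR3': '27',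
--      'LR4': '28', 'LR5': '29', 'LR6': '30', 'LR7': '31', 'LR8': '32'}
--
--     dic = {'Upper':{'left':['1','2','3','4','5','6'],'middle':['7','8','9','10'],'right':['11','12','13','14','15','16']},
--             'Lower':{'left':['32','31','30','29','28','27'],'middle':['26','25','24','23'],'right':['22','21','20','19','18','17']}}
--
--     if isinstance(landmarks[0],int):
--         landmarks = [str(landmark) for landmark in landmarks]
--
--     if not landmarks[0].isdigit():
--         landmarks = [ toothTonumber[tooth] for tooth in landmarks]
--
--     if int(landmarks[0]) <= 16 :
--         jaw = 'Upper'
--     else :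
--         jaw = 'Lower'
--     for side in ['left','middle','right']:
--         for landmark in landmarks:
--             if landmark in  dic[jaw][side] :
--                 out[side] = landmark
--
--
--     return out['left'], out['middle'], out['right']
-- ===== SOURCE B (Python) =====
-- def organizeLandmark(landmarks : list):
--     assert isinstance(landmarks, list)
--     assert len(landmarks) == 3
--
--     if isinstance(landmarks[0], int):
--         landmarks = [str(landmark) for landmark in landmarks]
--
--     if not landmarks[0].isdigit():
--         # tooth name -> universal number, computed arithmetically from quadrant + position
--         quad = {'UR': (9, -1), 'UL': (8, 1), 'LL': (25, -1), 'LR': (24, 1)}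
--         def toNumber(tooth):
--             base, sgn = quad[tooth[:2]]
--             return str(base + sgn * int(tooth[2:]))
--         landmarks = [toNumber(tooth) for tooth in landmarks]
--
--     if int(landmarks[0]) <= 16:
--         ranges = {'left': range(1, 7), 'middle': range(7, 11), 'right': range(11, 17)}
--     else:
--         ranges = {'left': range(27, 33), 'middle': range(23, 27), 'right': range(17, 23)}
--     side_of = {str(n): side for side, r in ranges.items() for n in r}
--
--     out = {'left': '', 'middle': '', 'right': ''}
--     for landmark in landmarks:
--         side = side_of.get(landmark)
--         if side is not None:
--             out[side] = landmark
--     return out['left'], out['middle'], out['right']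
-- ===== Notes on version B (the rewrite author's own statement) =====
-- stated objective: simpler
-- what changed: B replaces A's 32-entry tooth-name table by an arithmetic quadrant+position formula and replaces A's nested side-by-side membership loops by a single inverted number-to-side index built for the chosen jaw, assigning sides in one pass over the landmarks.
import Mathlib
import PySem

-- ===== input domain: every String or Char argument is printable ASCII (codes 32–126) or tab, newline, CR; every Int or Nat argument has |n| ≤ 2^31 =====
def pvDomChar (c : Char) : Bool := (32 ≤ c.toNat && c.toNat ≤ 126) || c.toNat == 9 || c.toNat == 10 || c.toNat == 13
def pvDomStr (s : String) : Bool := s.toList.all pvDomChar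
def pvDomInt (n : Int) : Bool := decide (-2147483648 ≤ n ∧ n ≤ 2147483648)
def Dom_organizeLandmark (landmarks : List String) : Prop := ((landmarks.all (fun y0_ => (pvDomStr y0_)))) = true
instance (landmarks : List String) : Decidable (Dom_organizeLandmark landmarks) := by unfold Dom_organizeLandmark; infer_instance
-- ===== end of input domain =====

-- B replaces the 32-entry tooth table and the nested per-side membership loops by an
-- arithmetic quadrant formula plus a single inverted number→side index and one pass
-- over the landmarks (objective: simpler).

-- ===== PORT A =====
def toothTonumberA : PySem.Dict String String := PySem.Dict.ofList
  [("UR8","1"),("UR7","2"),("UR6","3"),("UR5","4"),("UR4","5"),("UR3","6"),("UR2","7"),("UR1","8"),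
   ("UL1","9"),("UL2","10"),("UL3","11"),("UL4","12"),("UL5","13"),("UL6","14"),("UL7","15"),("UL8","16"),
   ("LL8","17"),("LL7","18"),("LL6","19"),("LL5","20"),("LL4","21"),("LL3","22"),("LL2","23"),("LL1","24"),
   ("LR1","25"),("LR2","26"),("LR3","27"),("LR4","28"),("LR5","29"),("LR6","30"),("LR7","31"),("LR8","32")]

def dicA : PySem.Dict String (PySem.Dict String (List String)) := PySem.Dict.ofList
  [("Upper", PySem.Dict.ofList
      [("left", ["1","2","3","4","5","6"]),
       ("middle", ["7","8","9","10"]),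
       ("right", ["11","12","13","14","15","16"])]),
   ("Lower", PySem.Dict.ofList
      [("left", ["32","31","30","29","28","27"]),
       ("middle", ["26","25","24","23"]),
       ("right", ["22","21","20","19","18","17"])])]

-- len(landmarks) == 3 assert and the KeyError of toothTonumber[tooth] are excluded by Pre_;
-- isinstance(landmarks[0], int) is always False for a list of strings, so that branch is omitted.
def organizeLandmark (landmarks : List String) : String × String × String :=
  let landmarks :=
    if !(PySem.Str.strIsdigit (landmarks.headD "")) then
      landmarks.map (fun tooth => (toothTonumberA.get? tooth).getD "")
    else landmarks
  let jaw := if ((PySem.Int.ofStr? (landmarks.headD "")).getD 0) ≤ 16 then "Upper" else "Lower"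
  let out : PySem.Dict String String := PySem.Dict.ofList [("left",""),("middle",""),("right","")]
  let out := (["left","middle","right"]).foldl (fun out side =>
      landmarks.foldl (fun out landmark =>
        if landmark ∈ ((dicA.getD jaw PySem.Dict.empty).getD side []) then out.insert side landmark
        else out) out) out
  (out.getD "left" "", out.getD "middle" "", out.getD "right" "")

-- ===== PORT B =====
def quadBaseB : PySem.Dict String (Int × Int) := PySem.Dict.ofList
  [("UR",(9,-1)),("UL",(8,1)),("LL",(25,-1)),("LR",(24,1))]

-- tooth name -> universal number string, computed from quadrant + position (KeyError/ValueError excluded by Pre_)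
def toNumberB (tooth : String) : String :=
  let p := (quadBaseB.get? (PySem.Str.slice tooth none (some 2))).getD (0, 0)
  PySem.Int.toStr (p.1 + p.2 * (PySem.Int.ofStr? (PySem.Str.slice tooth (some 2) none)).getD 0)

def organizeLandmark_alt (landmarks : List String) : String × String × String :=
  let landmarks :=
    if !(PySem.Str.strIsdigit (landmarks.headD "")) then landmarks.map toNumberB
    else landmarks
  let ranges : List (String × List Int) :=
    if ((PySem.Int.ofStr? (landmarks.headD "")).getD 0) ≤ 16 then
      [("left", PySem.List.pyRange 1 7 1), ("middle", PySem.List.pyRange 7 11 1), ("right", PySem.List.pyRange 11 17 1)]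
    else
      [("left", PySem.List.pyRange 27 33 1), ("middle", PySem.List.pyRange 23 27 1), ("right", PySem.List.pyRange 17 23 1)]
  let sideOf : PySem.Dict String String :=
    PySem.Dict.ofList (ranges.flatMap (fun p => p.2.map (fun n => (PySem.Int.toStr n, p.1))))
  let out : PySem.Dict String String := PySem.Dict.ofList [("left",""),("middle",""),("right","")]
  let out := landmarks.foldl (fun out landmark =>
      match sideOf.get? landmark with
      | some side => out.insert side landmark
      | none => out) out
  (out.getD "left" "", out.getD "middle" "", out.getD "right" "")

-- ===== PRECONDITION & SPEC =====
def pvToothKeys : List String :=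
  ["UR8","UR7","UR6","UR5","UR4","UR3","UR2","UR1","UL1","UL2","UL3","UL4","UL5","UL6","UL7","UL8",
   "LL8","LL7","LL6","LL5","LL4","LL3","LL2","LL1","LR1","LR2","LR3","LR4","LR5","LR6","LR7","LR8"]

-- Pre_ = exactly where Python A returns: three landmarks, and either the first is a digit string
-- (no tooth-table translation happens) or every landmark is a tooth name the table knows
-- (otherwise A raises AssertionError/KeyError).
def Pre_organizeLandmark (landmarks : List String) : Prop :=
  landmarks.length = 3 ∧
    (PySem.Str.strIsdigit (landmarks.headD "") = true ∨ ∀ l ∈ landmarks, l ∈ pvToothKeys)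
instance (landmarks : List String) : Decidable (Pre_organizeLandmark landmarks) := by
  unfold Pre_organizeLandmark; infer_instance

def pvWitness_organizeLandmark : List String := ["UR3", "UL1", "LL2"]

def Spec_organizeLandmark (landmarks : List String) (out : String × String × String) : Prop := out = organizeLandmark_alt landmarks
instance (landmarks : List String) (out : String × String × String) : Decidable (Spec_organizeLandmark landmarks out) := by unfold Spec_organizeLandmark; infer_instance

-- ===== CLAIM (what is proved, stated in full; the proofs are below) =====
def Claim_equal_organizeLandmark : Prop := ∀ (landmarks : List String), Dom_organizeLandmark landmarks → Pre_organizeLandmark landmarks → Spec_organizeLandmark landmarks (organizeLandmark landmarks)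

-- ===== LEMMAS AND PROOFS =====

-- the two inverted number→side dictionaries B builds, as literals
def sideOfUpper : PySem.Dict String String := PySem.Dict.mk
  [("1","left"),("2","left"),("3","left"),("4","left"),("5","left"),("6","left"),
   ("7","middle"),("8","middle"),("9","middle"),("10","middle"),
   ("11","right"),("12","right"),("13","right"),("14","right"),("15","right"),("16","right")]
def sideOfLower : PySem.Dict String String := PySem.Dict.mk
  [("27","left"),("28","left"),("29","left"),("30","left"),("31","left"),("32","left"),
   ("23","middle"),("24","middle"),("25","middle"),("26","middle"),
   ("17","right"),("18","right"),("19","right"),("20","right"),("21","right"),("22","right")]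

-- on the 32 tooth names, A's table lookup and B's arithmetic formula agree
lemma toothMap_eq (t : String) (ht : t ∈ pvToothKeys) :
    (toothTonumberA.get? t).getD "" = toNumberB t := by
  fin_cases ht <;> decide

-- A's inner loop for one side, read back through getD
lemma A_fold_getD (L : List String) (side : String) (ls : List String)
    (d : PySem.Dict String String) (k c : String) :
    (ls.foldl (fun out lm => if lm ∈ L then out.insert side lm else out) d).getD k c
      = if k = side then ls.foldl (fun acc lm => if lm ∈ L then lm else acc) (d.getD k c)
        else d.getD k c := by
  induction ls generalizing d with
  | nil => simp only [List.foldl_nil]; split <;> rfl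
  | cons x t ih =>
    simp only [List.foldl_cons]
    by_cases hx : x ∈ L
    · simp only [if_pos hx, ih, PySem.Dict.getD_insert]
      split <;> simp_all
    · rw [if_neg hx, ih, if_neg hx]

-- B's single pass, read back through getD
lemma B_fold_getD (sd : PySem.Dict String String) (ls : List String)
    (d : PySem.Dict String String) (k c : String) :
    (ls.foldl (fun out lm =>
        match sd.get? lm with
        | some side => out.insert side lm
        | none => out) d).getD k c
      = ls.foldl (fun acc lm => if sd.get? lm = some k then lm else acc) (d.getD k c) := by
  induction ls generalizing d with
  | nil => rfl
  | cons x t ih =>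
    simp only [List.foldl_cons]
    cases hx : sd.get? x with
    | none => simp [ih]
    | some s =>
      simp only [ih, PySem.Dict.getD_insert]
      rcases eq_or_ne k s with rfl | hk
      · simp
      · simp only [Option.some.injEq]
        rw [if_neg (Ne.symm hk), if_neg hk]

-- lookups in the inverted dictionaries, characterised as list membership
def upperNums : List String :=
  ["1","2","3","4","5","6","7","8","9","10","11","12","13","14","15","16"]
def lowerNums : List String :=
  ["17","18","19","20","21","22","23","24","25","26","27","28","29","30","31","32"]

lemma get_char_of_not_mem (d : PySem.Dict String String) (nums : List String) (lm k : String)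
    (hkeys : ∀ x, x ∈ d.keys → x ∈ nums) (hm : lm ∉ nums) (L : List String)
    (hL : ∀ x, x ∈ L → x ∈ nums) : (d.get? lm = some k) ↔ lm ∈ L := by
  have h0 : d.get? lm = none := by
    rw [PySem.Dict.get?_eq_none_iff_not_mem_keys]
    exact fun h => hm (hkeys _ h)
  simp only [h0]
  constructor
  · intro h; simp at h
  · intro h; exact absurd (hL _ h) hm

lemma sideOfUpper_get_left (lm : String) :
    (sideOfUpper.get? lm = some "left") ↔ lm ∈ (["1","2","3","4","5","6"] : List String) := by
  by_cases hm : lm ∈ upperNums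
  · fin_cases hm <;> decide
  · exact get_char_of_not_mem _ upperNums _ _ (by decide) hm _ (by decide)

lemma sideOfUpper_get_middle (lm : String) :
    (sideOfUpper.get? lm = some "middle") ↔ lm ∈ (["7","8","9","10"] : List String) := by
  by_cases hm : lm ∈ upperNums
  · fin_cases hm <;> decide
  · exact get_char_of_not_mem _ upperNums _ _ (by decide) hm _ (by decide)

lemma sideOfUpper_get_right (lm : String) :
    (sideOfUpper.get? lm = some "right") ↔ lm ∈ (["11","12","13","14","15","16"] : List String) := by
  by_cases hm : lm ∈ upperNums
  · fin_cases hm <;> decide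
  · exact get_char_of_not_mem _ upperNums _ _ (by decide) hm _ (by decide)

lemma sideOfLower_get_left (lm : String) :
    (sideOfLower.get? lm = some "left") ↔ lm ∈ (["32","31","30","29","28","27"] : List String) := by
  by_cases hm : lm ∈ lowerNums
  · fin_cases hm <;> decide
  · exact get_char_of_not_mem _ lowerNums _ _ (by decide) hm _ (by decide)

lemma sideOfLower_get_middle (lm : String) :
    (sideOfLower.get? lm = some "middle") ↔ lm ∈ (["26","25","24","23"] : List String) := by
  by_cases hm : lm ∈ lowerNums
  · fin_cases hm <;> decide
  · exact get_char_of_not_mem _ lowerNums _ _ (by decide) hm _ (by decide)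

lemma sideOfLower_get_right (lm : String) :
    (sideOfLower.get? lm = some "right") ↔ lm ∈ (["22","21","20","19","18","17"] : List String) := by
  by_cases hm : lm ∈ lowerNums
  · fin_cases hm <;> decide
  · exact get_char_of_not_mem _ lowerNums _ _ (by decide) hm _ (by decide)

-- the jaw selection + categorisation core of both ports agrees on EVERY list of landmark strings
lemma core_eq (ls : List String) :
    (let jaw := if ((PySem.Int.ofStr? (ls.headD "")).getD 0) ≤ 16 then "Upper" else "Lower"
     let out : PySem.Dict String String := PySem.Dict.ofList [("left",""),("middle",""),("right","")]
     let out := (["left","middle","right"]).foldl (fun out side =>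
        ls.foldl (fun out landmark =>
          if landmark ∈ ((dicA.getD jaw PySem.Dict.empty).getD side []) then out.insert side landmark
          else out) out) out
     ((out.getD "left" "", out.getD "middle" "", out.getD "right" "") : String × String × String))
    =
    (let ranges : List (String × List Int) :=
      if ((PySem.Int.ofStr? (ls.headD "")).getD 0) ≤ 16 then
        [("left", PySem.List.pyRange 1 7 1), ("middle", PySem.List.pyRange 7 11 1), ("right", PySem.List.pyRange 11 17 1)]
      else
        [("left", PySem.List.pyRange 27 33 1), ("middle", PySem.List.pyRange 23 27 1), ("right", PySem.List.pyRange 17 23 1)]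
     let sideOf : PySem.Dict String String :=
       PySem.Dict.ofList (ranges.flatMap (fun p => p.2.map (fun n => (PySem.Int.toStr n, p.1))))
     let out : PySem.Dict String String := PySem.Dict.ofList [("left",""),("middle",""),("right","")]
     let out := ls.foldl (fun out landmark =>
        match sideOf.get? landmark with
        | some side => out.insert side landmark
        | none => out) out
     (out.getD "left" "", out.getD "middle" "", out.getD "right" "")) := by
  by_cases hj : ((PySem.Int.ofStr? (ls.headD "")).getD 0) ≤ 16
  · simp only [hj, if_true]
    rw [show PySem.Dict.ofList
        ((([("left", PySem.List.pyRange 1 7 1), ("middle", PySem.List.pyRange 7 11 1),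
            ("right", PySem.List.pyRange 11 17 1)] : List (String × List Int))).flatMap
          (fun p => p.2.map (fun n => (PySem.Int.toStr n, p.1)))) = sideOfUpper from by decide]
    simp only [List.foldl_cons, List.foldl_nil]
    rw [show (dicA.getD "Upper" PySem.Dict.empty).getD "left" [] = ["1","2","3","4","5","6"] from by decide,
       show (dicA.getD "Upper" PySem.Dict.empty).getD "middle" [] = ["7","8","9","10"] from by decide,
       show (dicA.getD "Upper" PySem.Dict.empty).getD "right" [] = ["11","12","13","14","15","16"] from by decide]
    simp only [Prod.mk.injEq]
    refine ⟨?_, ?_, ?_⟩ <;>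
      rw [A_fold_getD, A_fold_getD, A_fold_getD, B_fold_getD] <;>
      simp [sideOfUpper_get_left, sideOfUpper_get_middle, sideOfUpper_get_right,
        show (PySem.Dict.ofList [("left",""),("middle",""),("right","")] : PySem.Dict String String).getD "left" "" = "" from by decide,
        show (PySem.Dict.ofList [("left",""),("middle",""),("right","")] : PySem.Dict String String).getD "middle" "" = "" from by decide,
        show (PySem.Dict.ofList [("left",""),("middle",""),("right","")] : PySem.Dict String String).getD "right" "" = "" from by decide]
  · simp only [hj, if_false]
    rw [show PySem.Dict.ofList
        ((([("left", PySem.List.pyRange 27 33 1), ("middle", PySem.List.pyRange 23 27 1),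
            ("right", PySem.List.pyRange 17 23 1)] : List (String × List Int))).flatMap
          (fun p => p.2.map (fun n => (PySem.Int.toStr n, p.1)))) = sideOfLower from by decide]
    simp only [List.foldl_cons, List.foldl_nil]
    rw [show (dicA.getD "Lower" PySem.Dict.empty).getD "left" [] = ["32","31","30","29","28","27"] from by decide,
       show (dicA.getD "Lower" PySem.Dict.empty).getD "middle" [] = ["26","25","24","23"] from by decide,
       show (dicA.getD "Lower" PySem.Dict.empty).getD "right" [] = ["22","21","20","19","18","17"] from by decide]
    simp only [Prod.mk.injEq]
    refine ⟨?_, ?_, ?_⟩ <;>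
      rw [A_fold_getD, A_fold_getD, A_fold_getD, B_fold_getD] <;>
      simp [sideOfLower_get_left, sideOfLower_get_middle, sideOfLower_get_right,
        show (PySem.Dict.ofList [("left",""),("middle",""),("right","")] : PySem.Dict String String).getD "left" "" = "" from by decide,
        show (PySem.Dict.ofList [("left",""),("middle",""),("right","")] : PySem.Dict String String).getD "middle" "" = "" from by decide,
        show (PySem.Dict.ofList [("left",""),("middle",""),("right","")] : PySem.Dict String String).getD "right" "" = "" from by decide]

-- ===== VERDICT (by name: the statement is the Claim_ definition above) =====
theorem organizeLandmark_spec : Claim_equal_organizeLandmark := by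
  intro landmarks _ hpre
  obtain ⟨hlen, hcase⟩ := hpre
  unfold Spec_organizeLandmark organizeLandmark organizeLandmark_alt
  by_cases hd : PySem.Str.strIsdigit (landmarks.headD "")
  · simp only [hd, Bool.not_true, Bool.false_eq_true, if_false]
    exact core_eq landmarks
  · have hall : ∀ l ∈ landmarks, l ∈ pvToothKeys := by
      rcases hcase with h | h
      · exact absurd h hd
      · exact h
    have hmap : landmarks.map (fun tooth => (toothTonumberA.get? tooth).getD "")
        = landmarks.map toNumberB :=
      List.map_congr_left (fun t ht => toothMap_eq t (hall t ht))
    simp only [hd, Bool.not_false, if_true]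
    rw [hmap]
    exact core_eq (landmarks.map toNumberB)
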